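-- pv_equiv track=rewrite | github.com/thealper2/codewars-solutions | 7-kyu/decompose_single_strand_dna_into_3_reading_frames.py | decompose_single_strand
-- ===== SOURCE A (Python) =====
-- def decompose_single_strand(single_strand):
--     n = len(single_strand)
--     frame1 = "Frame 1: " + " ".join([single_strand[i : i + 3] for i in range(0, n, 3)])
--     frame2 = "Frame 2: " + " ".join(
--         [single_strand[:1]] + [single_strand[i : i + 3] for i in range(1, n, 3)]
--     )
--     frame3 = "Frame 3: " + " ".join(
--         [single_strand[:2]] + [single_strand[i : i + 3] for i in range(2, n, 3)]
--     )
--     return "\n".join([frame1, frame2, frame3])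
-- ===== SOURCE B (Python) =====
-- def decompose_single_strand(single_strand):
--     # One pass over the characters, building all three frame buffers at once:
--     # a space is inserted before character i in frame f+1 when i > 0 and i % 3 == f.
--     bufs = [["Frame 1: "], ["Frame 2: "], ["Frame 3: "]]
--     for i, ch in enumerate(single_strand):
--         for f in range(3):
--             if i > 0 and i % 3 == f:
--                 bufs[f].append(" ")
--             bufs[f].append(ch)
--     return "\n".join("".join(b) for b in bufs)
-- ===== Notes on version B (the rewrite author's own statement) =====
-- stated objective: alternative
-- what changed: Replaces A's three separate codon-slicing comprehensions (one per reading frame, each re-slicing the string) by a single pass over the characters that builds all three frame buffers simultaneously, inserting a space before character i in frame f+1 exactly when i > 0 and i % 3 == f.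
import Mathlib
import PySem

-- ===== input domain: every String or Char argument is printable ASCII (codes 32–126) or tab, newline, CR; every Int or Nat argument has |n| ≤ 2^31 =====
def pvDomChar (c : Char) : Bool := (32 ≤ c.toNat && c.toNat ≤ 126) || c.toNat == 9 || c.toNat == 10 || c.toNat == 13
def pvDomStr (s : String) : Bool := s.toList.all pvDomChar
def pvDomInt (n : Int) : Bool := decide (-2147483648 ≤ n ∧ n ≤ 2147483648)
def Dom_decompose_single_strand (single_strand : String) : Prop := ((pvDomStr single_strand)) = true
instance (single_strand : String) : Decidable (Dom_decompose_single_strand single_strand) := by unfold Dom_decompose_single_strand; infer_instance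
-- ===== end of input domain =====

-- B replaces A's three codon-slicing comprehensions by a single pass over the characters
-- that builds all three frame buffers at once (objective: alternative decomposition).

-- ===== PORT A =====
def decompose_single_strand (single_strand : String) : String :=
  let cs := single_strand.toList
  let n : Int := PySem.Str.len single_strand
  let frame1 := "Frame 1: ".toList ++
    PySem.Chars.join [' ']
      ((PySem.List.pyRange 0 n 3).map (fun i => PySem.Chars.slice cs (some i) (some (i + 3))))
  let frame2 := "Frame 2: ".toList ++
    PySem.Chars.join [' ']
      (PySem.Chars.slice cs none (some 1) ::
        (PySem.List.pyRange 1 n 3).map (fun i => PySem.Chars.slice cs (some i) (some (i + 3))))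
  let frame3 := "Frame 3: ".toList ++
    PySem.Chars.join [' ']
      (PySem.Chars.slice cs none (some 2) ::
        (PySem.List.pyRange 2 n 3).map (fun i => PySem.Chars.slice cs (some i) (some (i + 3))))
  String.ofList (PySem.Chars.join ['\n'] [frame1, frame2, frame3])

-- ===== PORT B =====
-- one loop iteration of Source B: append (space and) current char to each of the three buffers
def pvStepB (b : List Char × List Char × List Char) (p : Int × Char) :
    List Char × List Char × List Char :=
  let b1 := (if 0 < p.1 ∧ PySem.Int.mod p.1 3 = 0 then b.1 ++ [' '] else b.1) ++ [p.2]
  let b2 := (if 0 < p.1 ∧ PySem.Int.mod p.1 3 = 1 then b.2.1 ++ [' '] else b.2.1) ++ [p.2]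
  let b3 := (if 0 < p.1 ∧ PySem.Int.mod p.1 3 = 2 then b.2.2 ++ [' '] else b.2.2) ++ [p.2]
  (b1, b2, b3)

def decompose_single_strand_alt (single_strand : String) : String :=
  let r := (PySem.List.enumerate single_strand.toList 0).foldl pvStepB
    ("Frame 1: ".toList, "Frame 2: ".toList, "Frame 3: ".toList)
  String.ofList (PySem.Chars.join ['\n'] [r.1, r.2.1, r.2.2])

-- ===== PRECONDITION & SPEC =====
def Spec_decompose_single_strand (single_strand : String) (out : String) : Prop := out = decompose_single_strand_alt single_strand
instance (single_strand : String) (out : String) : Decidable (Spec_decompose_single_strand single_strand out) := by unfold Spec_decompose_single_strand; infer_instance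

-- ===== CLAIM (what is proved, stated in full; the proofs are below) =====
def Claim_equal_decompose_single_strand : Prop := ∀ (single_strand : String), Dom_decompose_single_strand single_strand → Spec_decompose_single_strand single_strand (decompose_single_strand single_strand)

-- ===== LEMMAS AND PROOFS =====

-- canonical frame text: `pvBody r cs` emits the chars of cs, inserting a space every
-- 3 chars, the first space after r chars
def pvBody : Nat → List Char → List Char
  | _, [] => []
  | 0, c :: cs => ' ' :: pvBody 3 (c :: cs)
  | (r+1), c :: cs => c :: pvBody r cs
termination_by r cs => 2 * cs.length + (1 - r)
decreasing_by all_goals simp <;> omega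

-- the 3-chunks of a list
def pvChunks : List Char → List (List Char)
  | [] => []
  | [a] => [[a]]
  | [a, b] => [[a, b]]
  | a :: b :: c :: rest => [a, b, c] :: pvChunks rest

lemma pvChunks_cons (c : Char) (cs : List Char) :
    pvChunks (c :: cs) = (c :: cs).take 3 :: pvChunks ((c :: cs).drop 3) := by
  match cs with
  | [] => rfl
  | [b] => rfl
  | b :: d :: rest => rfl

lemma pvRange3_cons (a b : Int) (h : a < b) :
    PySem.List.pyRange a b 3 = a :: PySem.List.pyRange (a + 3) b 3 := by
  rw [PySem.List.pyRange_of_pos a b (by norm_num),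
      PySem.List.pyRange_of_pos (a + 3) b (by norm_num)]
  have hcnt : ((b - a + 3 - 1) / 3).toNat =
      (if a + 3 < b then ((b - (a + 3) + 3 - 1) / 3).toNat else 0) + 1 := by
    split_ifs with h2 <;> omega
  rw [if_pos h, hcnt, List.range_succ_eq_map]
  simp only [List.map_cons, List.map_map]
  congr 1
  · norm_num
  · apply List.map_congr_left
    intro k _
    simp only [Function.comp_apply]
    push_cast
    ring

lemma pvRange3_nil (a b : Int) (h : b ≤ a) : PySem.List.pyRange a b 3 = [] := by
  rw [PySem.List.pyRange_of_pos a b (by norm_num), if_neg (by omega)]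
  simp

lemma pvMapSlice (CS : List Char) : ∀ (cs : List Char) (a : Nat), CS.drop a = cs →
    (PySem.List.pyRange (a : Int) (CS.length : Int) 3).map
      (fun i => PySem.List.slice CS (some i) (some (i + 3))) = pvChunks cs := by
  intro cs
  induction cs using pvChunks.induct with
  | case1 =>
    intro a ha
    have hle : CS.length ≤ a := by
      have h := congrArg List.length ha
      simp only [List.length_drop, List.length_nil] at h
      omega
    rw [pvRange3_nil _ _ (by exact_mod_cast hle)]
    rfl
  | case2 x =>
    intro a ha
    have h := congrArg List.length ha
    simp only [List.length_drop, List.length_cons, List.length_nil] at h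
    have hlen : CS.length = a + 1 := by
      rcases Nat.lt_or_ge a CS.length with h1 | h1 <;> omega
    rw [pvRange3_cons _ _ (by exact_mod_cast (by omega : a < CS.length)),
        pvRange3_nil _ _ (by omega)]
    have hsl : PySem.List.slice CS (some (a : Int)) (some ((a : Int) + 3)) =
        (CS.drop a).take 3 := by simpa using PySem.List.slice_natCast_add CS a 3
    simp [hsl, ha, pvChunks]
  | case3 x y =>
    intro a ha
    have h := congrArg List.length ha
    simp only [List.length_drop, List.length_cons, List.length_nil] at h
    have hlen : CS.length = a + 2 := by
      rcases Nat.lt_or_ge a CS.length with h1 | h1 <;> omega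
    rw [pvRange3_cons _ _ (by exact_mod_cast (by omega : a < CS.length)),
        pvRange3_nil _ _ (by omega)]
    have hsl : PySem.List.slice CS (some (a : Int)) (some ((a : Int) + 3)) =
        (CS.drop a).take 3 := by simpa using PySem.List.slice_natCast_add CS a 3
    simp [hsl, ha, pvChunks]
  | case4 x y z rest ih =>
    intro a ha
    have h := congrArg List.length ha
    simp only [List.length_drop, List.length_cons] at h
    have hlt : a < CS.length := by
      rcases Nat.lt_or_ge a CS.length with h1 | h1 <;> omega
    rw [pvRange3_cons _ _ (by exact_mod_cast hlt)]
    simp only [List.map_cons]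
    have hsl : PySem.List.slice CS (some (a : Int)) (some ((a : Int) + 3)) =
        (CS.drop a).take 3 := by simpa using PySem.List.slice_natCast_add CS a 3
    have hdrop : CS.drop (a + 3) = rest := by
      rw [← List.drop_drop, ha]
      rfl
    have hcast : ((a : Int) + 3) = ((a + 3 : Nat) : Int) := by push_cast; ring
    rw [hsl, ha, hcast, ih (a + 3) hdrop, pvChunks]
    rfl

lemma pvJoinChunks : ∀ cs : List Char, PySem.Chars.join [' '] (pvChunks cs) = pvBody 3 cs := by
  intro cs
  induction cs using pvChunks.induct with
  | case1 => simp [pvChunks, PySem.Chars.join_nil, pvBody]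
  | case2 a => simp [pvChunks, PySem.Chars.join_singleton, pvBody]
  | case3 a b => simp [pvChunks, PySem.Chars.join_singleton, pvBody]
  | case4 a b c rest ih =>
    match rest, ih with
    | [], _ => simp [pvChunks, PySem.Chars.join_singleton, pvBody]
    | x :: xs, ih =>
      rw [pvChunks, pvChunks_cons, PySem.Chars.join_cons_cons, ← pvChunks_cons, ih]
      simp [pvBody]

-- the per-frame space/char emission of Source B's loop body
def pvG (f : Int) (p : Int × Char) : List Char :=
  if 0 < p.1 ∧ PySem.Int.mod p.1 3 = f then [' ', p.2] else [p.2]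

lemma pvStepB_eq (b : List Char × List Char × List Char) (p : Int × Char) :
    pvStepB b p = (b.1 ++ pvG 0 p, b.2.1 ++ pvG 1 p, b.2.2 ++ pvG 2 p) := by
  simp only [pvStepB, pvG, Prod.mk.injEq]
  refine ⟨?_, ?_, ?_⟩ <;> (split_ifs <;> simp)

lemma pvTriple (l : List (Int × Char)) : ∀ (a1 a2 a3 : List Char),
    l.foldl pvStepB (a1, a2, a3) =
      (l.foldl (fun acc p => acc ++ pvG 0 p) a1,
       l.foldl (fun acc p => acc ++ pvG 1 p) a2,
       l.foldl (fun acc p => acc ++ pvG 2 p) a3) := by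
  induction l with
  | nil => intro a1 a2 a3; rfl
  | cons p l ih =>
    intro a1 a2 a3
    simp only [List.foldl_cons]
    rw [pvStepB_eq, ih]

lemma pvFlatBody (f : Nat) (hf : f < 3) : ∀ (cs : List Char) (k r : Nat),
    r ≤ 3 → (k + r) % 3 = f → (r = 0 → 0 < k) → (r = 3 → k = 0) →
    (PySem.List.enumerate cs (k : Int)).flatMap (pvG (f : Int)) = pvBody r cs := by
  intro cs
  induction cs with
  | nil => intro k r _ _ _ _; simp [PySem.List.enumerate_nil, pvBody]
  | cons c cs ih =>
    intro k r hr3 hmod h0 h3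
    have hcast : (k : Int) + 1 = ((k + 1 : Nat) : Int) := by push_cast; ring
    rw [PySem.List.enumerate_cons, List.flatMap_cons, hcast]
    have hm : PySem.Int.mod (k : Int) 3 = ((k % 3 : Nat) : Int) := by
      exact_mod_cast PySem.Int.mod_natCast k 3
    have hcond : (0 < (k : Int) ∧ PySem.Int.mod (k : Int) 3 = (f : Int)) ↔
        (0 < k ∧ k % 3 = f) := by
      rw [hm]
      constructor
      · rintro ⟨h1, h2⟩; exact ⟨by exact_mod_cast h1, by exact_mod_cast h2⟩
      · rintro ⟨h1, h2⟩; exact ⟨by exact_mod_cast h1, by exact_mod_cast h2⟩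
    match r, hr3 with
    | 0, _ =>
      have hk : 0 < k := h0 rfl
      have hg : pvG (f : Int) ((k : Int), c) = [' ', c] := by
        simp only [pvG, if_pos (hcond.mpr ⟨hk, by omega⟩)]
      rw [hg, ih (k + 1) 2 (by omega) (by omega) (by omega) (by omega)]
      simp [pvBody]
    | 1, _ =>
      have hg : pvG (f : Int) ((k : Int), c) = [c] := by
        simp only [pvG]
        rw [if_neg]
        intro hc
        have := hcond.mp hc
        omega
      rw [hg, ih (k + 1) 0 (by omega) (by omega) (by omega) (by omega)]
      simp [pvBody]
    | 2, _ =>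
      have hg : pvG (f : Int) ((k : Int), c) = [c] := by
        simp only [pvG]
        rw [if_neg]
        intro hc
        have := hcond.mp hc
        omega
      rw [hg, ih (k + 1) 1 (by omega) (by omega) (by omega) (by omega)]
      simp [pvBody]
    | 3, _ =>
      have hk : k = 0 := h3 rfl
      have hf0 : f = 0 := by omega
      have hg : pvG (f : Int) ((k : Int), c) = [c] := by
        simp only [pvG]
        rw [if_neg]
        intro hc
        have := hcond.mp hc
        omega
      rw [hg, ih (k + 1) 2 (by omega) (by omega) (by omega) (by omega)]
      simp [pvBody]

-- frame contents of A equal pvBody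
lemma pvFrame1 (cs : List Char) :
    PySem.Chars.join [' ']
      ((PySem.List.pyRange 0 (cs.length : Int) 3).map
        (fun i => PySem.Chars.slice cs (some i) (some (i + 3)))) = pvBody 3 cs := by
  have h := pvMapSlice cs cs 0 (by simp)
  simp only [PySem.Chars.slice_eq_listSlice, Nat.cast_zero] at h ⊢
  rw [h, pvJoinChunks]

lemma pvFrame2 (cs : List Char) :
    PySem.Chars.join [' ']
      (PySem.Chars.slice cs none (some 1) ::
        (PySem.List.pyRange 1 (cs.length : Int) 3).map
          (fun i => PySem.Chars.slice cs (some i) (some (i + 3)))) = pvBody 1 cs := by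
  have h := pvMapSlice cs (cs.drop 1) 1 rfl
  simp only [PySem.Chars.slice_eq_listSlice, Nat.cast_one] at h ⊢
  rw [h, PySem.List.slice_to cs (b := 1) (by norm_num)]
  match cs with
  | [] => simp [pvChunks, PySem.Chars.join_singleton, pvBody]
  | c :: cs =>
    simp only [List.drop_succ_cons, List.drop_zero]
    match cs with
    | [] => simp [pvChunks, PySem.Chars.join_singleton, pvBody]
    | x :: xs =>
      rw [pvChunks_cons, PySem.Chars.join_cons_cons, ← pvChunks_cons, pvJoinChunks]
      simp [pvBody]

lemma pvFrame3 (cs : List Char) :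
    PySem.Chars.join [' ']
      (PySem.Chars.slice cs none (some 2) ::
        (PySem.List.pyRange 2 (cs.length : Int) 3).map
          (fun i => PySem.Chars.slice cs (some i) (some (i + 3)))) = pvBody 2 cs := by
  have h := pvMapSlice cs (cs.drop 2) 2 rfl
  simp only [PySem.Chars.slice_eq_listSlice, Nat.cast_ofNat] at h ⊢
  rw [h, PySem.List.slice_to cs (b := 2) (by norm_num)]
  match cs with
  | [] => simp [pvChunks, PySem.Chars.join_singleton, pvBody]
  | [c] => simp [pvChunks, PySem.Chars.join_singleton, pvBody]
  | c :: d :: cs =>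
    simp only [List.drop_succ_cons, List.drop_zero]
    match cs with
    | [] => simp [pvChunks, PySem.Chars.join_singleton, pvBody]
    | x :: xs =>
      rw [pvChunks_cons, PySem.Chars.join_cons_cons, ← pvChunks_cons, pvJoinChunks]
      simp [pvBody]

-- ===== VERDICT (by name: the statement is the Claim_ definition above) =====
theorem decompose_single_strand_spec : Claim_equal_decompose_single_strand := by
  intro s _
  show decompose_single_strand s = decompose_single_strand_alt s
  simp only [decompose_single_strand, decompose_single_strand_alt]
  rw [pvTriple]
  simp only [PySem.List.foldl_append_eq_flatMap, PySem.Str.len_eq]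
  have h0 := pvFlatBody 0 (by omega) s.toList 0 3 (by omega) (by omega) (by omega) (by omega)
  have h1 := pvFlatBody 1 (by omega) s.toList 0 1 (by omega) (by omega) (by omega) (by omega)
  have h2 := pvFlatBody 2 (by omega) s.toList 0 2 (by omega) (by omega) (by omega) (by omega)
  norm_num at h0 h1 h2
  rw [h0, h1, h2, pvFrame1, pvFrame2, pvFrame3]
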